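-- pv_equiv track=rewrite | github.com/BonfireAI/bonfire | src/bonfire/dispatch/security_hooks.py | _resolve_dot_segments
-- ===== SOURCE A (Python) =====
-- def _resolve_dot_segments(path: str) -> tuple[str, bool]:
--     """Resolve ``.`` and ``..`` segments in ``path``.
--
--     Walks ``path`` segment-wise, dropping ``.`` and popping the predecessor
--     on ``..``. The anchor (``~/``, ``/``, or none for relative paths) is
--     preserved and acts as a floor — a ``..`` that would pop past the anchor
--     is dropped (clamped) and the underflow is reported via the second
--     return value. Adversarial inputs like
--     ``/home/alice/Documents/../.ssh/id_rsa`` collapse to ``~/.ssh/id_rsa``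
--     after the home substitution (no underflow), while
--     ``/etc/sudoers/../passwd`` collapses to ``/etc/passwd`` (no
--     underflow) — both reach the deny-prefix scan in their canonical form.
--
--     Returns ``(canonical_path, underflowed)`` where ``underflowed`` is
--     True if any ``..`` segment would have popped past the anchor floor.
--     Cross-user escapes like ``/home/alice/../bob/.ssh/id_rsa`` substitute
--     to ``~/../bob/.ssh/id_rsa`` and trip the underflow flag — the caller
--     must treat underflow as deny because the kernel resolves the original
--     path to a different user's home, defeating the alice-anchored deny
--     scan.
--
--     Empty segments (from accidental trailing slashes) are also dropped.
--     """
--     if path.startswith("~/"):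
--         anchor = "~/"
--         tail = path[2:]
--     elif path == "~":
--         return "~", False
--     elif path.startswith("/"):
--         anchor = "/"
--         tail = path[1:]
--     else:
--         anchor = ""
--         tail = path
--     if "/" not in tail and tail not in (".", ".."):
--         # Fast path: a single segment that is not itself a dot-segment.
--         return anchor + tail, False
--     resolved: list[str] = []
--     underflowed = False
--     for seg in tail.split("/"):
--         if seg == "" or seg == ".":
--             continue
--         if seg == "..":
--             if resolved:
--                 resolved.pop()
--             else:
--                 # ``..`` underflows past the anchor — clamp by dropping
--                 # but flag the escape so the caller can refuse.
--                 underflowed = True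
--             continue
--         resolved.append(seg)
--     return anchor + "/".join(resolved), underflowed
-- ===== SOURCE B (Python) =====
-- def _collapse(segs):
--     """Resolve segs recursively from the right: segs resolves to '..'*up + kept."""
--     if not segs:
--         return [], 0
--     kept, up = _collapse(segs[1:])
--     if segs[0] == "..":
--         return kept, up + 1
--     if up:
--         return kept, up - 1
--     return [segs[0]] + kept, up
--
--
-- def _resolve_dot_segments(path: str) -> tuple[str, bool]:
--     if path == "~":
--         return "~", False
--     if path.startswith("~/"):
--         anchor, tail = "~/", path[2:]
--     elif path.startswith("/"):
--         anchor, tail = "/", path[1:]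
--     else:
--         anchor, tail = "", path
--     kept, up = _collapse([s for s in tail.split("/") if s not in ("", ".")])
--     return anchor + "/".join(kept), up > 0
-- ===== Notes on version B (the rewrite author's own statement) =====
-- stated objective: alternative
-- what changed: A's single-segment fast path and left-to-right stack loop (append/pop on 'resolved', a per-'..' underflow flag) are replaced by one filter of the split list followed by a right-anchored recursion _collapse that carries a pending-'..' count: a segment list resolves to '..'*up + kept, kept is built front-to-back with no stack pops and no fast path, and underflow is the final up > 0.
import Mathlib
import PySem

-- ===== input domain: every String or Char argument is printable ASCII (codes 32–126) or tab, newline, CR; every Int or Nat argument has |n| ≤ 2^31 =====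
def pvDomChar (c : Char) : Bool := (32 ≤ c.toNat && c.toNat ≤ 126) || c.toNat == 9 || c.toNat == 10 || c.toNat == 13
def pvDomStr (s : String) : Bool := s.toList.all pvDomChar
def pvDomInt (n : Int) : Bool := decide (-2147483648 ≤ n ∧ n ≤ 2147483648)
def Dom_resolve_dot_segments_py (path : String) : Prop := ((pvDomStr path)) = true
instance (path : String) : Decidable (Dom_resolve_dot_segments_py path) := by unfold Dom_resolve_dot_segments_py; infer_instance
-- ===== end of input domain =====

-- B drops A's fast path and stack/pop loop: it filters the split once and resolves the
-- segments by a right-anchored recursion carrying a pending-'..' count (alternative decomposition).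

-- ===== PORT A =====
-- the 'for seg in tail.split("/")' loop of A: state (resolved, underflowed)
def pvALoop : List String → List String → Bool → List String × Bool
  | [], resolved, underflowed => (resolved, underflowed)
  | seg :: rest, resolved, underflowed =>
    if seg = "" ∨ seg = "." then pvALoop rest resolved underflowed
    else if seg = ".." then
      if resolved ≠ [] then pvALoop rest resolved.dropLast underflowed
      else pvALoop rest resolved true
    else pvALoop rest (resolved ++ [seg]) underflowed

-- A's code after the anchor/tail prologue (fast path, then the loop)
def pvAAfter (anchor tail : String) : String × Bool :=
  if PySem.Str.isIn "/" tail = false ∧ tail ≠ "." ∧ tail ≠ ".." then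
    (anchor ++ tail, false)
  else
    let r := pvALoop ((PySem.Str.split? tail "/").getD []) [] false
    (anchor ++ PySem.Str.join "/" r.1, r.2)

def resolve_dot_segments_py (path : String) : String × Bool :=
  if PySem.Str.startswith path "~/" then
    pvAAfter "~/" (PySem.Str.slice path (some 2) none)
  else if path = "~" then ("~", false)
  else if PySem.Str.startswith path "/" then
    pvAAfter "/" (PySem.Str.slice path (some 1) none)
  else
    pvAAfter "" path

-- ===== PORT B =====
-- B's helper _collapse: a head recursion meaning 'segs resolves to ".."*up ++ kept'
def pvCollapse : List String → List String × Nat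
  | [] => ([], 0)
  | seg :: rest =>
    let r := pvCollapse rest
    if seg = ".." then (r.1, r.2 + 1)
    else if 0 < r.2 then (r.1, r.2 - 1)
    else (seg :: r.1, r.2)

def resolve_dot_segments_py_alt (path : String) : String × Bool :=
  if path = "~" then ("~", false)
  else
    let at2 : String × String :=
      if PySem.Str.startswith path "~/" then ("~/", PySem.Str.slice path (some 2) none)
      else if PySem.Str.startswith path "/" then ("/", PySem.Str.slice path (some 1) none)
      else ("", path)
    let r := pvCollapse (((PySem.Str.split? at2.2 "/").getD []).filter
      (fun s => !(s == "" || s == ".")))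
    (at2.1 ++ PySem.Str.join "/" r.1, decide (0 < r.2))

-- ===== PRECONDITION & SPEC =====
def Spec_resolve_dot_segments_py (path : String) (out : String × Bool) : Prop := out = resolve_dot_segments_py_alt path
instance (path : String) (out : String × Bool) : Decidable (Spec_resolve_dot_segments_py path out) := by unfold Spec_resolve_dot_segments_py; infer_instance

-- ===== CLAIM (what is proved, stated in full; the proofs are below) =====
def Claim_equal_resolve_dot_segments_py : Prop := ∀ (path : String), Dom_resolve_dot_segments_py path → Spec_resolve_dot_segments_py path (resolve_dot_segments_py path)

-- ===== LEMMAS AND PROOFS =====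

-- splitting by a separator that does not occur yields the whole string
theorem pv_go_no_sep (sep : List Char) (fuel : Nat) :
    ∀ (l cur : List Char) (acc : List (List Char)), ¬ sep <:+: l →
      PySem.Chars.splitOn.go sep fuel l cur acc = ((cur.reverse ++ l) :: acc).reverse := by
  induction fuel with
  | zero => intro l cur acc _; rfl
  | succ n ih =>
    intro l cur acc h
    cases l with
    | nil => simp [PySem.Chars.splitOn.go]
    | cons c rest =>
      have hp : sep.isPrefixOf (c :: rest) = false := by
        by_contra hh
        exact h ((List.isPrefixOf_iff_prefix.mp (by simpa using hh)).isInfix)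
      rw [PySem.Chars.splitOn.go]
      simp only [hp, Bool.false_eq_true, if_false]
      rw [ih rest (c :: cur) acc (fun hi => h (hi.trans (List.suffix_cons c rest).isInfix))]
      simp

theorem pv_splitOn_no_sep (s sep : List Char) (h : ¬ sep <:+: s) :
    PySem.Chars.splitOn s sep = [s] := by
  unfold PySem.Chars.splitOn
  rw [pv_go_no_sep sep (s.length + 1) s [] [] h]
  simp

theorem pv_split_no_sep (tail : String) (h : PySem.Str.isIn "/" tail = false) :
    (PySem.Str.split? tail "/").getD [] = [tail] := by
  have h' : ¬ ("/" : String).toList <:+: tail.toList := by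
    intro hi
    rw [PySem.Str.isIn, PySem.Chars.isIn_eq_false_iff] at h
    exact h hi
  simp only [PySem.Str.split?, PySem.Chars.split?]
  rw [show ("/" : String).toList = ['/'] from rfl] at h' ⊢
  rw [pv_splitOn_no_sep _ _ h']
  simp [String.ofList_toList]

-- A's loop ignores '' and '.' segments
theorem pvALoop_filter (l : List String) : ∀ (acc : List String) (uf : Bool),
    pvALoop l acc uf = pvALoop (l.filter (fun s => !(s == "" || s == "."))) acc uf := by
  induction l with
  | nil => intro acc uf; rfl
  | cons seg rest ih =>
    intro acc uf
    by_cases h : seg = "" ∨ seg = "."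
    · have : (!(seg == "" || seg == ".")) = false := by
        rcases h with h | h <;> simp [h]
      simp only [pvALoop, if_pos h, List.filter_cons, this, Bool.false_eq_true, if_false]
      exact ih acc uf
    · have hb : (!(seg == "" || seg == ".")) = true := by
        simp only [not_or] at h; simp [h.1, h.2]
      simp only [List.filter_cons, hb, if_true]
      simp only [pvALoop, if_neg h]
      split_ifs with h2 h3
      · exact ih _ _
      · exact ih _ _
      · exact ih _ _

-- the core invariant: A's stack loop in terms of B's collapse recursion
theorem pvKey (l : List String) (hl : ∀ s ∈ l, ¬(s = "" ∨ s = ".")) :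
    ∀ (acc : List String) (uf : Bool),
    pvALoop l acc uf =
      (acc.take (acc.length - (pvCollapse l).2) ++ (pvCollapse l).1,
       uf || decide (acc.length < (pvCollapse l).2)) := by
  induction l with
  | nil => intro acc uf; simp [pvALoop, pvCollapse]
  | cons seg rest ih =>
    intro acc uf
    have hseg := hl seg (List.mem_cons_self)
    have hrest : ∀ s ∈ rest, ¬(s = "" ∨ s = ".") := fun s hs => hl s (List.mem_cons_of_mem _ hs)
    set k := (pvCollapse rest).1 with hk
    set u := (pvCollapse rest).2 with hu
    simp only [pvALoop, pvCollapse, if_neg hseg]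
    by_cases h2 : seg = ".."
    · simp only [if_pos h2]
      by_cases h3 : acc ≠ []
      · have hlen : 1 ≤ acc.length := by
          cases acc with
          | nil => exact absurd rfl h3
          | cons a t => simp
        simp only [if_pos h3]
        rw [ih hrest acc.dropLast uf]
        simp only [← hk, ← hu, Prod.mk.injEq]
        refine ⟨?_, ?_⟩
        · rw [List.length_dropLast, List.dropLast_eq_take, List.take_take]
          congr 2
          omega
        · rw [List.length_dropLast]
          congr 1
          rw [decide_eq_decide]
          omega
      · simp only [if_neg h3]
        simp only [ne_eq, not_not] at h3
        subst h3
        rw [ih hrest [] true]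
        simp [← hk, ← hu]
    · simp only [if_neg h2]
      rw [ih hrest (acc ++ [seg]) uf]
      by_cases h4 : 0 < u
      · simp only [← hk, ← hu, if_pos h4, Prod.mk.injEq]
        refine ⟨?_, ?_⟩
        · rw [List.length_append, List.take_append_of_le_length (by simp; omega)]
          congr 2
          simp
          omega
        · rw [List.length_append]
          congr 1
          rw [decide_eq_decide]
          simp
          omega
      · have h5 : u = 0 := by omega
        simp only [← hk, ← hu, h5, Prod.mk.injEq]
        refine ⟨?_, ?_⟩
        · rw [List.take_of_length_le (by simp)]
          simp
        · simp

-- membership property of B's filter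
theorem pv_filter_ok (l : List String) :
    ∀ s ∈ l.filter (fun s => !(s == "" || s == ".")), ¬(s = "" ∨ s = ".") := by
  intro s hs
  have := (List.mem_filter.mp hs).2
  simp at this
  intro h
  rcases h with h | h <;> simp [h] at this

-- the post-prologue computations agree
theorem pvAfter_eq (anchor tail : String) :
    pvAAfter anchor tail =
      (anchor ++ PySem.Str.join "/" (pvCollapse (((PySem.Str.split? tail "/").getD []).filter
        (fun s => !(s == "" || s == ".")))).1,
       decide (0 < (pvCollapse (((PySem.Str.split? tail "/").getD []).filter
        (fun s => !(s == "" || s == ".")))).2)) := by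
  unfold pvAAfter
  split_ifs with h
  · obtain ⟨h1, h2, h3⟩ := h
    rw [pv_split_no_sep tail h1]
    by_cases he : tail = ""
    · subst he
      have hf : (List.filter (fun s => !(s == "" || s == ".")) [""]) = [] := by decide
      rw [hf, Prod.mk.injEq]
      refine ⟨?_, by simp [pvCollapse]⟩
      apply String.toList_inj.mp
      simp [pvCollapse, PySem.Str.join, PySem.Chars.join, List.intercalate]

    · have hb : (!(tail == "" || tail == ".")) = true := by simp [he, h2]
      simp only [List.filter_cons, hb, if_true, List.filter_nil]
      simp only [pvCollapse, if_neg h3]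
      rw [Prod.mk.injEq]
      refine ⟨?_, by simp⟩
      apply String.toList_inj.mp
      simp [PySem.Str.toList_join, PySem.Chars.join_singleton]
  · rw [pvALoop_filter, pvKey _ (pv_filter_ok _) [] false]
    simp

-- ===== VERDICT (by name: the statement is the Claim_ definition above) =====
theorem resolve_dot_segments_py_spec : Claim_equal_resolve_dot_segments_py := by
  intro path _
  unfold Spec_resolve_dot_segments_py resolve_dot_segments_py resolve_dot_segments_py_alt
  by_cases h0 : path = "~"
  · subst h0; rfl
  · simp only [if_neg h0]
    split_ifs <;> simp only [pvAfter_eq]
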